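-- pv_equiv track=rewrite | github.com/recorre/nocodebackend-frontend | utils/helpers.py | calculate_stats
-- ===== SOURCE A (Python) =====
-- from typing import Dict, Any, Optional
--
-- def calculate_stats(comments: list) -> Dict[str, int]:
--     """Calculate comment statistics"""
--     total = len(comments)
--     approved = len([c for c in comments if c.get('is_approved') == 1])
--     pending = len([c for c in comments if c.get('is_approved') == 0])
--     rejected = len([c for c in comments if c.get('is_approved') == 2])
--
--     return {
--         'total': total,
--         'approved': approved,
--         'pending': pending,
--         'rejected': rejected
--     }
-- ===== SOURCE B (Python) =====
-- def calculate_stats(comments: list):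
--     """Calculate comment statistics (single pass over the comments)."""
--     approved = pending = rejected = 0
--     for c in comments:
--         v = c.get('is_approved')
--         if v == 1:
--             approved += 1
--         elif v == 0:
--             pending += 1
--         elif v == 2:
--             rejected += 1
--     return {
--         'total': len(comments),
--         'approved': approved,
--         'pending': pending,
--         'rejected': rejected
--     }
-- ===== Notes on version B (the rewrite author's own statement) =====
-- stated objective: alternative
-- what changed: Replaced three independent list-comprehension scans with one loop that reads each comment's is_approved once and increments three counters.
import Mathlib
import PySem

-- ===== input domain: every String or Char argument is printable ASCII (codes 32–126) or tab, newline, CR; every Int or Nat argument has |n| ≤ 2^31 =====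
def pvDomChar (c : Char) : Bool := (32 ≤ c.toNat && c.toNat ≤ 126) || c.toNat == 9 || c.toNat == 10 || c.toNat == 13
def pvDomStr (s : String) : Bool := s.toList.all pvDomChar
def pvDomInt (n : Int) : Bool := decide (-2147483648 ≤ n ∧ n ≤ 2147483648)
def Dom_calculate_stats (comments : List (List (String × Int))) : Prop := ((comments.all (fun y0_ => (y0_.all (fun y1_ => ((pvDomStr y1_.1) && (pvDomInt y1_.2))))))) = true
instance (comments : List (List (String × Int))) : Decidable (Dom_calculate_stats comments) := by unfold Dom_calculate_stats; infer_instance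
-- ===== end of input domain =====

-- B replaces A's three independent list-comprehension scans with a single loop
-- keeping three counters (one pass instead of three; same asymptotic cost).


-- c.get('is_approved'): first match in the association list (exact: Python dict lookup)
def pvGetApproved (c : List (String × Int)) : Option Int :=
  (c.find? (fun p => p.1 == "is_approved")).map (·.2)

-- ===== PORT A =====
def calculate_stats (comments : List (List (String × Int))) : List (String × Int) :=
  let total : Int := comments.length
  let approved : Int := (comments.filter (fun c => pvGetApproved c == some 1)).length
  let pending : Int := (comments.filter (fun c => pvGetApproved c == some 0)).length
  let rejected : Int := (comments.filter (fun c => pvGetApproved c == some 2)).length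
  [("total", total), ("approved", approved), ("pending", pending), ("rejected", rejected)]

-- ===== PORT B =====
def pvStep (acc : Int × Int × Int) (c : List (String × Int)) : Int × Int × Int :=
  let v := pvGetApproved c
  if v == some 1 then (acc.1 + 1, acc.2.1, acc.2.2)
  else if v == some 0 then (acc.1, acc.2.1 + 1, acc.2.2)
  else if v == some 2 then (acc.1, acc.2.1, acc.2.2 + 1)
  else acc

def calculate_stats_alt (comments : List (List (String × Int))) : List (String × Int) :=
  let t := comments.foldl pvStep (0, 0, 0)
  [("total", (comments.length : Int)), ("approved", t.1), ("pending", t.2.1), ("rejected", t.2.2)]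

-- ===== PRECONDITION & SPEC =====
def Spec_calculate_stats (comments : List (List (String × Int))) (out : List (String × Int)) : Prop := out = calculate_stats_alt comments
instance (comments : List (List (String × Int))) (out : List (String × Int)) : Decidable (Spec_calculate_stats comments out) := by unfold Spec_calculate_stats; infer_instance

-- ===== CLAIM (what is proved, stated in full; the proofs are below) =====
def Claim_equal_calculate_stats : Prop := ∀ (comments : List (List (String × Int))), Dom_calculate_stats comments → Spec_calculate_stats comments (calculate_stats comments)

-- ===== LEMMAS AND PROOFS =====
theorem pvFold_eq (l : List (List (String × Int))) (a p r : Int) :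
    l.foldl pvStep (a, p, r) =
      (a + (l.filter (fun c => pvGetApproved c == some 1)).length,
       p + (l.filter (fun c => pvGetApproved c == some 0)).length,
       r + (l.filter (fun c => pvGetApproved c == some 2)).length) := by
  induction l generalizing a p r with
  | nil => simp
  | cons c tl ih =>
    simp only [List.foldl_cons, List.filter_cons, pvStep]
    by_cases h1 : pvGetApproved c == some 1
    · have h0 : ¬ (pvGetApproved c == some 0) := by simp_all
      have h2 : ¬ (pvGetApproved c == some 2) := by simp_all
      simp [h1, h0, h2, ih]; omega
    · by_cases h0 : pvGetApproved c == some 0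
      · have h2 : ¬ (pvGetApproved c == some 2) := by simp_all
        simp [h1, h0, h2, ih]; omega
      · by_cases h2 : pvGetApproved c == some 2
        · simp [h1, h0, h2, ih]; omega
        · simp [h1, h0, h2, ih]

-- ===== VERDICT (by name: the statement is the Claim_ definition above) =====
theorem calculate_stats_spec : Claim_equal_calculate_stats := by
  intro comments _
  unfold Spec_calculate_stats calculate_stats calculate_stats_alt
  simp [pvFold_eq]
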